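-- pv_equiv track=rewrite | github.com/sainipradeep/AnAlgorithmADay2018 | Day-13/amendTheSentence.py | amendTheSentence
-- ===== SOURCE A (Python) =====
-- def amendTheSentence(s):
--
--     result = ""
--
--     for char in s:
--         if char.isupper():
--             result += " " + char.lower()
--         else:
--             result += char
--
--     return result.strip()
-- ===== SOURCE B (Python) =====
-- def amendTheSentence(s):
--     low = s.lower()
--     cuts = [i for i, c in enumerate(s) if c.isupper()]
--     parts = [low[a:b] for a, b in zip([0] + cuts, cuts + [len(s)])]
--     return ' '.join(parts).strip()
-- ===== Notes on version B (the rewrite author's own statement) =====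
-- stated objective: alternative
-- what changed: B is a staged index/slice algorithm: it lowercases the whole string once, computes the list of uppercase positions, slices the lowered string between consecutive cut positions, and joins the slices with spaces, instead of A's single character-by-character pass accumulating one result string with a leading-space-then-strip trick.
import Mathlib
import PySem

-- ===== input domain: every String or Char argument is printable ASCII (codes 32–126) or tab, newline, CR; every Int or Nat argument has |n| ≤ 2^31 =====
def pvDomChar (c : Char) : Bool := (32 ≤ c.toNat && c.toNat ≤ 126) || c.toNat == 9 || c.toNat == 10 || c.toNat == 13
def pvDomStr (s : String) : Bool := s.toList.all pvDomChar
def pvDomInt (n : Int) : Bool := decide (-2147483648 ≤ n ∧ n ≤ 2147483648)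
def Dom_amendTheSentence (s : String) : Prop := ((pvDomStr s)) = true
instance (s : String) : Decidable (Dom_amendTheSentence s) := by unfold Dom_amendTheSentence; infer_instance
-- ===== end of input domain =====

-- B replaces A's single accumulating pass by a staged index/slice algorithm: lowercase once,
-- compute uppercase cut positions, slice between cuts, join with spaces (alternative, same cost).

-- ===== PORT A =====
-- result = ""; for char in s: result += " " + char.lower() if char.isupper() else char; return result.strip()
def amendTheSentence (s : String) : String :=
  String.ofList (PySem.Chars.strip
    (s.toList.foldl
      (fun result char =>
        if PySem.Chars.isupper char then result ++ [' ', PySem.Chars.lowerChar char]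
        else result ++ [char]) []))

-- ===== PORT B =====
-- cuts = [i for i, c in enumerate(s) if c.isupper()]
def pvCuts (l : List Char) : List Int :=
  ((PySem.List.enumerate l).filter (fun p => PySem.Chars.isupper p.2)).map (fun p => p.1)

-- parts = [low[a:b] for a, b in zip([0] + cuts, cuts + [len(s)])]
def pvParts (l : List Char) : List (List Char) :=
  (List.zip ((0 : Int) :: pvCuts l) (pvCuts l ++ [(l.length : Int)])).map
    (fun ab => PySem.List.slice (PySem.Chars.lower l) (some ab.1) (some ab.2))

-- low = s.lower(); return ' '.join(parts).strip()
def amendTheSentence_alt (s : String) : String :=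
  String.ofList (PySem.Chars.strip (PySem.Chars.join [' '] (pvParts s.toList)))

-- ===== PRECONDITION & SPEC =====
def Spec_amendTheSentence (s : String) (out : String) : Prop := out = amendTheSentence_alt s
instance (s : String) (out : String) : Decidable (Spec_amendTheSentence s out) := by unfold Spec_amendTheSentence; infer_instance

-- ===== CLAIM (what is proved, stated in full; the proofs are below) =====
def Claim_equal_amendTheSentence : Prop := ∀ (s : String), Dom_amendTheSentence s → Spec_amendTheSentence s (amendTheSentence s)

-- ===== LEMMAS AND PROOFS =====

-- the common value both programs compute before the final strip
def pvW : List Char → List Char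
  | [] => []
  | c :: t => if PySem.Chars.isupper c then ' ' :: PySem.Chars.lowerChar c :: pvW t else c :: pvW t

-- A's loop accumulates pvW
theorem foldA_eq (l : List Char) (acc : List Char) :
    l.foldl
      (fun result char =>
        if PySem.Chars.isupper char then result ++ [' ', PySem.Chars.lowerChar char]
        else result ++ [char]) acc = acc ++ pvW l := by
  induction l generalizing acc with
  | nil => simp [pvW]
  | cons c t ih =>
    by_cases hc : PySem.Chars.isupper c = true <;>
      simp [pvW, hc, ih, List.append_assoc]

theorem enumerate_shift {α : Type} (l : List α) (s : Int) :
    PySem.List.enumerate l (s + 1) = (PySem.List.enumerate l s).map (fun p => (p.1 + 1, p.2)) := by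
  induction l generalizing s with
  | nil => simp [PySem.List.enumerate_nil]
  | cons x t ih => simp [PySem.List.enumerate_cons, ih]

theorem cuts_cons (c : Char) (t : List Char) :
    pvCuts (c :: t) =
      (if PySem.Chars.isupper c then [(0 : Int)] else []) ++ (pvCuts t).map (· + 1) := by
  unfold pvCuts
  rw [PySem.List.enumerate_cons]
  have h1 : PySem.List.enumerate t 1 = (PySem.List.enumerate t 0).map (fun p => (p.1 + 1, p.2)) := by
    simpa using enumerate_shift t 0
  by_cases hc : PySem.Chars.isupper c = true <;>
    simp [hc, h1, List.filter_map, Function.comp_def]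

theorem mem_cuts_nonneg (l : List Char) (i : Int) (h : i ∈ pvCuts l) : 0 ≤ i := by
  unfold pvCuts at h
  rcases List.mem_map.mp h with ⟨p, hp, rfl⟩
  have hp' := List.mem_of_mem_filter hp
  rcases (PySem.List.mem_enumerate_iff _ _ _).mp hp' with ⟨k, hk, rfl⟩
  simp

theorem slice_succ_succ {α : Type} (x : α) (xs : List α) (a b : Int) (ha : 0 ≤ a) (hb : 0 ≤ b) :
    PySem.List.slice (x :: xs) (some (a + 1)) (some (b + 1)) =
      PySem.List.slice xs (some a) (some b) := by
  rw [PySem.List.slice_toNat _ (by omega) (by omega),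
      PySem.List.slice_toNat _ ha hb]
  have h1 : (a + 1).toNat = a.toNat + 1 := by omega
  have h2 : (b + 1).toNat = b.toNat + 1 := by omega
  simp [h1, h2]

theorem slice_zero_succ {α : Type} (x : α) (xs : List α) (b : Int) (hb : 0 ≤ b) :
    PySem.List.slice (x :: xs) (some 0) (some (b + 1)) =
      x :: PySem.List.slice xs (some 0) (some b) := by
  rw [PySem.List.slice_toNat _ (by omega) (by omega),
      PySem.List.slice_toNat _ le_rfl hb]
  have h2 : (b + 1).toNat = b.toNat + 1 := by omega
  simp [h2, List.take_succ_cons]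

theorem join_cons_of_cons (c : Char) (p : List Char) (pr : List (List Char)) :
    PySem.Chars.join [' '] ((c :: p) :: pr) = c :: PySem.Chars.join [' '] (p :: pr) := by
  cases pr with
  | nil => simp [PySem.Chars.join, List.intercalate]
  | cons q qr =>
    rw [PySem.Chars.join_cons_cons, PySem.Chars.join_cons_cons]
    simp

theorem join_nil_cons (p : List Char) (pr : List (List Char)) :
    PySem.Chars.join [' '] ([] :: p :: pr) = ' ' :: PySem.Chars.join [' '] (p :: pr) := by
  rw [PySem.Chars.join_cons_cons]
  simp

-- the tail of B's zip, shifted by one position, is the tail of B's zip for the tail string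
theorem parts_cons (c : Char) (t : List Char) :
    pvParts (c :: t) =
      if PySem.Chars.isupper c then
        [] :: ((PySem.Chars.lowerChar c :: (pvParts t).headI) :: (pvParts t).tail)
      else (c :: (pvParts t).headI) :: (pvParts t).tail := by
  have hn : (0 : Int) ≤ (t.length : Int) := by positivity
  -- decompose pvCuts t ++ [t.length]
  obtain ⟨y0, yr, hy⟩ : ∃ y0 yr, pvCuts t ++ [(t.length : Int)] = y0 :: yr := by
    cases h : pvCuts t ++ [(t.length : Int)] with
    | nil => simp at h
    | cons a b => exact ⟨a, b, rfl⟩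
  have hy0 : 0 ≤ y0 := by
    have : y0 ∈ pvCuts t ++ [(t.length : Int)] := by rw [hy]; simp
    rcases List.mem_append.mp this with h | h
    · exact mem_cuts_nonneg t y0 h
    · simp at h; omega
  have hyr : ∀ b ∈ yr, 0 ≤ b := by
    intro b hb
    have : b ∈ pvCuts t ++ [(t.length : Int)] := by rw [hy]; simp [hb]
    rcases List.mem_append.mp this with h | h
    · exact mem_cuts_nonneg t b h
    · simp at h; omega
  have hlen : ((c :: t).length : Int) = (t.length : Int) + 1 := by
    push_cast [List.length_cons]; ring
  have hshift : (pvCuts t).map (· + 1) ++ [((c :: t).length : Int)] =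
      (y0 + 1) :: yr.map (· + 1) := by
    have h2 : (pvCuts t).map (· + 1) ++ [((c :: t).length : Int)] =
        (pvCuts t ++ [(t.length : Int)]).map (· + 1) := by
      rw [hlen]; simp [List.map_append]
    rw [h2, hy]; simp
  have hlow : PySem.Chars.lower (c :: t) = PySem.Chars.lowerChar c :: PySem.Chars.lower t := by
    simp [PySem.Chars.lower]
  -- the shifted tail maps onto the tail of pvParts t
  have htail : (List.zip ((pvCuts t).map (· + 1)) (yr.map (· + 1))).map
        (fun ab => PySem.List.slice (PySem.Chars.lower (c :: t)) (some ab.1) (some ab.2)) =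
      (List.zip (pvCuts t) yr).map
        (fun ab => PySem.List.slice (PySem.Chars.lower t) (some ab.1) (some ab.2)) := by
    rw [List.zip_map, List.map_map]
    apply List.map_congr_left
    rintro ⟨a, b⟩ hab
    obtain ⟨ha', hb'⟩ := List.of_mem_zip hab
    have ha : 0 ≤ a := mem_cuts_nonneg t a ha'
    have hb : 0 ≤ b := hyr b hb'
    simp only [Function.comp, Prod.map]
    rw [hlow]
    exact slice_succ_succ _ _ _ _ ha hb
  have hhead : PySem.List.slice (PySem.Chars.lower (c :: t)) (some 0) (some (y0 + 1)) =
      PySem.Chars.lowerChar c :: PySem.List.slice (PySem.Chars.lower t) (some 0) (some y0) := by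
    rw [hlow]; exact slice_zero_succ _ _ _ hy0
  have hzz : PySem.List.slice (PySem.Chars.lower (c :: t)) (some (0:Int)) (some (0:Int)) = [] := by
    rw [PySem.List.slice_toNat _ le_rfl le_rfl]; simp
  by_cases hc : PySem.Chars.isupper c = true
  · simp only [hc, if_pos]
    unfold pvParts
    rw [cuts_cons]
    simp only [hc, if_pos, List.cons_append, List.nil_append]
    rw [hshift, hy]
    simp only [List.zip_cons_cons, List.map_cons]
    rw [htail, hzz, hhead]
    simp
  · simp only [hc, Bool.false_eq_true, if_neg, not_false_iff]
    unfold pvParts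
    rw [cuts_cons]
    simp only [hc, Bool.false_eq_true, if_neg, not_false_iff, List.nil_append]
    rw [hshift, hy]
    simp only [List.zip_cons_cons, List.map_cons]
    rw [htail, hhead]
    have hcc : PySem.Chars.lowerChar c = c := by
      simp [PySem.Chars.lowerChar, hc]
    rw [hcc]
    simp

theorem parts_ne_nil (l : List Char) : pvParts l ≠ [] := by
  unfold pvParts
  cases h : pvCuts l ++ [(l.length : Int)] with
  | nil => simp at h
  | cons a b => simp

theorem join_parts (l : List Char) : PySem.Chars.join [' '] (pvParts l) = pvW l := by
  induction l with
  | nil =>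
    simp only [pvParts, pvCuts, PySem.List.enumerate_nil, List.filter_nil, List.map_nil,
      List.nil_append, List.length_nil, Nat.cast_zero, List.zip_cons_cons, List.zip_nil_right,
      List.map_cons]
    rw [PySem.List.slice_toNat _ le_rfl le_rfl]
    simp [pvW, PySem.Chars.join, List.intercalate]
  | cons c t ih =>
    obtain ⟨h, rest, hpt⟩ : ∃ h rest, pvParts t = h :: rest := by
      cases hp : pvParts t with
      | nil => exact absurd hp (parts_ne_nil t)
      | cons a b => exact ⟨a, b, rfl⟩
    rw [parts_cons]
    by_cases hc : PySem.Chars.isupper c = true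
    · simp only [hc, if_pos, hpt, List.headI, List.tail]
      rw [join_nil_cons, join_cons_of_cons, ← hpt, ih]
      simp [pvW, hc]
    · simp only [hc, Bool.false_eq_true, if_neg, not_false_iff, hpt, List.headI, List.tail]
      rw [join_cons_of_cons, ← hpt, ih]
      simp [pvW, hc]

-- ===== VERDICT (by name: the statement is the Claim_ definition above) =====
theorem amendTheSentence_spec : Claim_equal_amendTheSentence := by
  intro s _
  show amendTheSentence s = amendTheSentence_alt s
  unfold amendTheSentence amendTheSentence_alt
  rw [foldA_eq, join_parts]
  simp
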